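-- pv_equiv track=rewrite | github.com/mynl/GREAT | great/pres_maker.py | _sparsify_mi
-- ===== SOURCE A (Python) =====
-- def _sparsify_mi(mi):
--     """
--     as above for a multi index level, without the benefit of the index...
--     really all should use this function
--     :param mi:
--     :return:
--     """
--     last = mi[0]
--     new_col = list(mi)
--     rules = []
--     for k, v in enumerate(new_col[1:]):
--         if v == last:
--             new_col[k+1] = ''
--         else:
--             last = v
--             rules.append(k+1)
--             new_col[k+1] = v
--     return new_col, rules
-- ===== SOURCE B (Python) =====
-- from itertools import groupby
--
-- def _sparsify_mi(mi):
--     new_col = []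
--     rules = []
--     pos = 0
--     for _, grp in groupby(mi):
--         run = list(grp)
--         if pos > 0:
--             rules.append(pos)
--         new_col.append(run[0])
--         new_col.extend([''] * (len(run) - 1))
--         pos += len(run)
--     return new_col, rules
-- ===== Notes on version B (the rewrite author's own statement) =====
-- stated objective: alternative
-- what changed: Instead of A's index-based in-place mutation of a copy of mi (enumerate over mi[1:] with a running 'last' and assignments by index), B iterates over maximal runs of consecutive equal values via itertools.groupby, emitting each run's head followed by blanks and recording each non-initial run's start position.
import Mathlib
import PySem

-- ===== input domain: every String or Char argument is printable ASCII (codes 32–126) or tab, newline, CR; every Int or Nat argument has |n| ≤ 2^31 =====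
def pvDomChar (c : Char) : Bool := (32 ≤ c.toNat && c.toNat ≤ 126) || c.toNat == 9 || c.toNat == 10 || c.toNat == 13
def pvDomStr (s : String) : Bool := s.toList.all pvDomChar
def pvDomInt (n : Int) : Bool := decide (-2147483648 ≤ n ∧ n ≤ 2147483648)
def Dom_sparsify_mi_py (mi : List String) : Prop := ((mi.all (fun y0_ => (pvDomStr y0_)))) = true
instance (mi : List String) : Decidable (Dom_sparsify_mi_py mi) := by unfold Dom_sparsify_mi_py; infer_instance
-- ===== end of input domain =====

-- B replaces A's index-based in-place blanking with a run (groupby) decomposition; alternative structure, same O(n) cost.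


-- ===== PORT A =====
-- the for-loop of A: state (last, new_col, rules); k is the enumerate counter,
-- the last argument is the snapshot new_col[1:] being iterated.
def sparsifyLoopA (k : Nat) (last : String) (new_col : List String)
    (rules : List Int) : List String → List String × List Int
  | [] => (new_col, rules)
  | v :: rest =>
    if v == last then
      sparsifyLoopA (k + 1) last (new_col.set (k + 1) "") rules rest
    else
      sparsifyLoopA (k + 1) v (new_col.set (k + 1) v) (rules ++ [(k : Int) + 1]) rest

def sparsify_mi_py (mi : List String) : List String × List Int :=
  match PySem.List.pyGet? mi 0 with    -- last = mi[0]; none = IndexError, excluded by Pre_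
  | none => ([], [])
  | some last => sparsifyLoopA 0 last mi [] (mi.drop 1)   -- mi.drop 1 = mi[1:]

-- ===== PORT B =====
-- list(groupby(mi)): the maximal runs of consecutive equal values.
-- goRuns carries the current run's head h and the (reversed) rest of the run,
-- comparing each new element to h — exactly groupby's rule.
def goRuns (h : String) (rrun : List String) : List String → List (List String)
  | [] => [h :: rrun.reverse]
  | v :: vs =>
    if v == h then goRuns h (v :: rrun) vs
    else (h :: rrun.reverse) :: goRuns v [] vs

def runsOf : List String → List (List String)
  | [] => []
  | x :: xs => goRuns x [] xs

def sparsify_mi_py_alt (mi : List String) : List String × List Int :=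
  let r := (runsOf mi).foldl
    (fun (st : (List String × List Int) × Nat) run =>
      let out := st.1.1
      let rules := st.1.2
      let pos := st.2
      let rules' := if pos > 0 then rules ++ [(pos : Int)] else rules
      ((out ++ [run.headD ""] ++ List.replicate (run.length - 1) "", rules'), pos + run.length))
    (([], []), 0)
  r.1

-- ===== PRECONDITION & SPEC =====
-- A raises IndexError on the empty list (mi[0]); Pre_ excludes exactly that input.
def Pre_sparsify_mi_py (mi : List String) : Prop := mi ≠ []
instance (mi : List String) : Decidable (Pre_sparsify_mi_py mi) := by unfold Pre_sparsify_mi_py; infer_instance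
def pvWitness_sparsify_mi_py : List String := ["a", "a", "b"]

def Spec_sparsify_mi_py (mi : List String) (out : List String × List Int) : Prop := out = sparsify_mi_py_alt mi
instance (mi : List String) (out : List String × List Int) : Decidable (Spec_sparsify_mi_py mi out) := by unfold Spec_sparsify_mi_py; infer_instance

-- ===== CLAIM (what is proved, stated in full; the proofs are below) =====
def Claim_equal_sparsify_mi_py : Prop := ∀ (mi : List String), Dom_sparsify_mi_py mi → Pre_sparsify_mi_py mi → Spec_sparsify_mi_py mi (sparsify_mi_py mi)

-- ===== LEMMAS AND PROOFS =====

-- common specification: spec last i vs = (blanked tail, rule indices), vs starting at absolute index i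
def specSp (last : String) (i : Nat) : List String → List String × List Int
  | [] => ([], [])
  | v :: vs =>
    if v == last then
      let r := specSp last (i + 1) vs
      ("" :: r.1, r.2)
    else
      let r := specSp v (i + 1) vs
      (v :: r.1, (i : Int) :: r.2)

theorem set_append_cons (acc : List String) (v a : String) (vs : List String) :
    (acc ++ v :: vs).set acc.length a = acc ++ a :: vs := by
  induction acc with
  | nil => rfl
  | cons x xs ih => simp [List.set, ih]

theorem loopA_spec (vs : List String) : ∀ (acc : List String) (rules : List Int) (k : Nat) (last : String),
    acc.length = k + 1 →
    sparsifyLoopA k last (acc ++ vs) rules vs =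
      (acc ++ (specSp last (k + 1) vs).1, rules ++ (specSp last (k + 1) vs).2) := by
  induction vs with
  | nil => intro acc rules k last h; simp [sparsifyLoopA, specSp]
  | cons v vs ih =>
    intro acc rules k last h
    by_cases hv : v == last
    · have hset : (acc ++ v :: vs).set (k + 1) "" = (acc ++ [""]) ++ vs := by
        rw [← h, set_append_cons]; simp
      have hlen : (acc ++ [""]).length = (k + 1) + 1 := by simp [h]
      simp only [sparsifyLoopA, hv, if_pos, hset, specSp]
      rw [ih (acc ++ [""]) rules (k + 1) last hlen]
      simp [hv]
    · have hset : (acc ++ v :: vs).set (k + 1) v = (acc ++ [v]) ++ vs := by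
        rw [← h, set_append_cons]; simp
      have hlen : (acc ++ [v]).length = (k + 1) + 1 := by simp [h]
      simp only [sparsifyLoopA, hv, if_neg, hset, specSp]
      rw [ih (acc ++ [v]) (rules ++ [(k : Int) + 1]) (k + 1) v hlen]
      push_cast
      simp

theorem portA_eq_spec (x : String) (xs : List String) :
    sparsify_mi_py (x :: xs) = (x :: (specSp x 1 xs).1, (specSp x 1 xs).2) := by
  have := loopA_spec xs [x] [] 0 x (by simp)
  simpa [sparsify_mi_py, PySem.List.pyGet?, PySem.List.pyIdx?] using this

theorem specSp_blank_run (g : List String) : ∀ (last : String) (i : Nat) (rest : List String),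
    (∀ v ∈ g, (v == last) = true) →
    specSp last i (g ++ rest) =
      (List.replicate g.length "" ++ (specSp last (i + g.length) rest).1,
       (specSp last (i + g.length) rest).2) := by
  induction g with
  | nil => intro last i rest _; simp
  | cons v g ih =>
    intro last i rest hall
    have hv : (v == last) = true := hall v (by simp)
    simp only [List.cons_append, specSp, hv, if_pos]
    rw [ih last (i + 1) rest (fun w hw => hall w (by simp [hw]))]
    have harith : i + 1 + g.length = i + (g.length + 1) := by omega
    rw [harith]
    simp [List.replicate_succ]

theorem goRuns_eq (vs : List String) : ∀ (h : String) (rrun : List String),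
    goRuns h rrun vs =
      (h :: (rrun.reverse ++ vs.takeWhile (· == h))) :: runsOf (vs.dropWhile (· == h)) := by
  induction vs with
  | nil => intro h rrun; simp [goRuns, runsOf]
  | cons v vs ih =>
    intro h rrun
    by_cases hv : v == h
    · simp only [goRuns, hv, if_pos, List.takeWhile_cons, List.dropWhile_cons]
      rw [ih h (v :: rrun)]
      simp [hv]
    · simp only [goRuns, hv, if_neg, List.takeWhile_cons, List.dropWhile_cons]
      simp [hv, runsOf]

theorem runsOf_cons (x : String) (xs : List String) :
    runsOf (x :: xs) = (x :: xs.takeWhile (· == x)) :: runsOf (xs.dropWhile (· == x)) := by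
  simpa using goRuns_eq xs x []

-- B's fold over the runs of mi equals specSp composed with the head
theorem foldB_spec (n : Nat) : ∀ (mi : List String), mi.length ≤ n →
    ∀ (out : List String) (rules : List Int) (pos : Nat),
    (runsOf mi).foldl
      (fun (st : (List String × List Int) × Nat) run =>
        ((st.1.1 ++ [run.headD ""] ++ List.replicate (run.length - 1) "",
          if st.2 > 0 then st.1.2 ++ [(st.2 : Int)] else st.1.2),
         st.2 + run.length))
      ((out, rules), pos) =
    (match mi with
     | [] => ((out, rules), pos)
     | x :: xs =>
       ((out ++ x :: (specSp x (pos + 1) xs).1,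
         (if pos > 0 then rules ++ [(pos : Int)] else rules) ++ (specSp x (pos + 1) xs).2),
        pos + mi.length)) := by
  induction n with
  | zero =>
    intro mi hlen out rules pos
    have : mi = [] := by cases mi <;> simp_all
    subst this; simp [runsOf]
  | succ n ih =>
    intro mi hlen out rules pos
    match mi with
    | [] => simp [runsOf]
    | x :: xs =>
      have hsplit : xs.takeWhile (· == x) ++ xs.dropWhile (· == x) = xs :=
        List.takeWhile_append_dropWhile
      have hrestlen : (xs.dropWhile (· == x)).length ≤ n := by
        have := List.length_dropWhile_le (p := (· == x)) (l := xs)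
        simp at hlen; omega
      have hall : ∀ v ∈ xs.takeWhile (· == x), (v == x) = true := by
        intro v hv
        exact List.mem_takeWhile_imp (p := fun y => y == x) hv
      have hhead : ∀ w ws, xs.dropWhile (· == x) = w :: ws → (w == x) = false := by
        intro w ws hws
        have hne : xs.dropWhile (· == x) ≠ [] := by simp [hws]
        have := List.head_dropWhile_not (p := (· == x)) (l := xs) hne
        simp only [hws, List.head_cons] at this
        simpa using this
      have hblank := specSp_blank_run (xs.takeWhile (· == x)) x (pos + 1) (xs.dropWhile (· == x)) hall
      rw [runsOf_cons, List.foldl_cons]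
      generalize hG : xs.takeWhile (· == x) = G at hsplit hblank ⊢
      generalize hR : xs.dropWhile (· == x) = R at hsplit hhead hrestlen hblank ⊢
      subst hsplit
      rw [ih R hrestlen]
      cases R with
      | nil =>
        simp only [List.append_nil] at hblank
        simp [hblank, specSp, List.replicate]
      | cons w ws =>
        have hw : (w == x) = false := hhead w ws rfl
        have hpos : pos + (G.length + 1) > 0 := by omega
        have harith : pos + (G.length + 1) = pos + 1 + G.length := by omega
        simp [hblank, specSp, hw, hpos, harith, List.replicate]
        omega

theorem portB_eq_spec (x : String) (xs : List String) :
    sparsify_mi_py_alt (x :: xs) = (x :: (specSp x 1 xs).1, (specSp x 1 xs).2) := by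
  have := foldB_spec (x :: xs).length (x :: xs) le_rfl [] [] 0
  simp only [sparsify_mi_py_alt]
  simp at this ⊢
  rw [this]

-- ===== VERDICT (by name: the statement is the Claim_ definition above) =====
theorem sparsify_mi_py_spec : Claim_equal_sparsify_mi_py := by
  intro mi _ hpre
  unfold Spec_sparsify_mi_py
  match mi with
  | [] => exact absurd rfl hpre
  | x :: xs => rw [portA_eq_spec, portB_eq_spec]
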